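-- pv_equiv track=rewrite | github.com/twisted/twisted | twisted/popsicle/mailsicle.py | headersToTuples
-- ===== SOURCE A (Python) =====
-- def headersToTuples(hdrs):
--     hdrl = []
--     protohdr = None
--     for line in hdrs.split("\n"):
--         if not line: continue
--         if line[0] != '\t':
--             header, valBegin = line.split(': ', 1)
--             if protohdr:
--                 hdrl.append(tuple(protohdr))
--             protohdr = [header, valBegin]
--         else:
--             protohdr[1] += '\n'+line[1:]
--     if protohdr:
--         hdrl.append(tuple(protohdr))
--     return hdrl
-- ===== SOURCE B (Python) =====
-- def headersToTuples(hdrs):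
--     lines = [l for l in hdrs.split("\n") if l]
--     def build(ls):
--         if not ls:
--             return []
--         header, val = ls[0].split(': ', 1)
--         k = 1
--         while k < len(ls) and ls[k].startswith('\t'):
--             k += 1
--         body = '\n'.join([val] + [c[1:] for c in ls[1:k]])
--         return [(header, body)] + build(ls[k:])
--     return build(lines)
-- ===== Notes on version B (the rewrite author's own statement) =====
-- stated objective: alternative
-- what changed: A streams once over the physical lines with a pending (header,value) accumulator mutated in place; B filters out blank lines, then recursively chunks the list: each step splits the head line once, scans off the run of tab continuations, joins them with newlines into the body, and recurses on the remainder, building the output front-to-back with no accumulator.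
import Mathlib
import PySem

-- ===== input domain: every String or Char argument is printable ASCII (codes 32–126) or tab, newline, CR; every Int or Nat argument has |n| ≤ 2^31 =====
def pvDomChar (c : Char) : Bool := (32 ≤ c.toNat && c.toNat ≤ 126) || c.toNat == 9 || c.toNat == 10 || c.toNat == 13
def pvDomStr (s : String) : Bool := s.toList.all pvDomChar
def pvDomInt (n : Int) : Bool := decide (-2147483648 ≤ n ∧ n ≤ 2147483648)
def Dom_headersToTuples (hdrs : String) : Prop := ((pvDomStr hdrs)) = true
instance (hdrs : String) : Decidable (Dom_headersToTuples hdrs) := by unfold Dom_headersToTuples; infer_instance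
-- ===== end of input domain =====

-- B replaces A's single streaming pass (pending (header,value) accumulator mutated line by line)
-- by: filter out blank lines, then recursively chunk the list — split the head line once, scan off
-- the run of tab continuations, join them into the body, recurse on the remainder.
-- Objective: alternative decomposition (same cost).

-- shared helper: `header, val = line.split(': ', 1)` — `none` is Python's ValueError
-- (unpacking fails when ': ' is absent); both A and B make this very call.
def pvSplitColon (l : List Char) : Option (List Char × List Char) :=
  match PySem.Chars.splitMax? l [':', ' '] 1 with
  | some [h, v] => some (h, v)
  | _ => none

-- ===== PORT A =====
-- loop state: (hdrl, protohdr); `none` = an exception has been raised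
def pvStepA (st : Option (List (List Char × List Char) × Option (List Char × List Char)))
    (line : List Char) : Option (List (List Char × List Char) × Option (List Char × List Char)) :=
  match st with
  | none => none
  | some (hdrl, protohdr) =>
    if line = [] then some (hdrl, protohdr)          -- if not line: continue
    else if PySem.List.pyGet? line 0 ≠ some '\t' then
      match pvSplitColon line with
      | none => none                                 -- ValueError
      | some hv => some (hdrl ++ protohdr.toList, some hv)   -- if protohdr: hdrl.append(…); protohdr = [header, valBegin]
    else
      match protohdr with
      | none => none                                 -- TypeError: protohdr is None
      | some (h, v) => some (hdrl, some (h, v ++ '\n' :: PySem.List.slice line (some 1) none))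

def headersToTuples (hdrs : String) : List (String × String) :=
  match (PySem.Chars.splitOn hdrs.toList ['\n']).foldl pvStepA (some ([], none)) with
  | none => []                                       -- Python raises here (excluded by Pre_)
  | some (hdrl, protohdr) =>
      (hdrl ++ protohdr.toList).map (fun p => (String.ofList p.1, String.ofList p.2))

-- ===== PORT B =====
-- ls[k].startswith('\t') — the continuation test of B's inner scan
def pvIsCont (l : List Char) : Bool := PySem.Chars.startswith l ['\t']

-- build(ls): the recursive chunker; the `while` index scan up to the first non-tab line is
-- ported as takeWhile (= ls[1:k]) / dropWhile (= ls[k:]), exact since k is by construction the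
-- index of the first non-continuation line. `none` = ValueError from the unpacking split.
def pvBuild : List (List Char) → Option (List (String × String))
  | [] => some []
  | line :: rest =>
    match pvSplitColon line with
    | none => none
    | some (h, v) =>
      let conts := rest.takeWhile pvIsCont
      let body := PySem.Chars.join ['\n']
        (v :: conts.map (fun c => PySem.List.slice c (some 1) none))
      match pvBuild (rest.dropWhile pvIsCont) with
      | none => none
      | some tl => some ((String.ofList h, String.ofList body) :: tl)
  termination_by ls => ls.length
  decreasing_by
    simp only [List.length_cons]
    exact Nat.lt_succ_of_le (List.length_dropWhile_le _ _)

def headersToTuples_alt (hdrs : String) : List (String × String) :=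
  match pvBuild ((PySem.Chars.splitOn hdrs.toList ['\n']).filter (fun l => !l.isEmpty)) with
  | none => []                                       -- Python raises here (excluded by Pre_)
  | some tl => tl

-- ===== PRECONDITION & SPEC =====
-- Pre_ excludes exactly the inputs where A raises: a non-empty line that neither starts with a tab
-- nor contains the colon-space separator (ValueError from tuple unpacking), or a first non-empty
-- line starting with a tab (TypeError: protohdr is None).
def Pre_headersToTuples (hdrs : String) : Prop :=
  (∀ l ∈ PySem.Chars.splitOn hdrs.toList ['\n'],
      l ≠ [] → PySem.List.pyGet? l 0 ≠ some '\t' → PySem.Chars.isIn [':', ' '] l = true) ∧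
  (((PySem.Chars.splitOn hdrs.toList ['\n']).filter (fun l => !l.isEmpty)).head?.all
      (fun l => !PySem.Chars.startswith l ['\t']) = true)
instance (hdrs : String) : Decidable (Pre_headersToTuples hdrs) := by
  unfold Pre_headersToTuples; infer_instance
def pvWitness_headersToTuples : String := "From: me\nSubject: a\n\tfolded line\n\nTo: you"
def Spec_headersToTuples (hdrs : String) (out : List (String × String)) : Prop := out = headersToTuples_alt hdrs
instance (hdrs : String) (out : List (String × String)) : Decidable (Spec_headersToTuples hdrs out) := by unfold Spec_headersToTuples; infer_instance

-- ===== CLAIM (what is proved, stated in full; the proofs are below) =====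
def Claim_equal_headersToTuples : Prop := ∀ (hdrs : String), Dom_headersToTuples hdrs → Pre_headersToTuples hdrs → Spec_headersToTuples hdrs (headersToTuples hdrs)

-- ===== LEMMAS AND PROOFS =====

-- "split at the first occurrence of sep": the specification of str.split with maxsplit 1
def pvSplitFirst (sep : List Char) : List Char → Option (List Char × List Char)
  | [] => none
  | c :: rest => if sep.isPrefixOf (c :: rest) then some ([], (c :: rest).drop sep.length)
      else (pvSplitFirst sep rest).map (fun p => (c :: p.1, p.2))

theorem pv_go_zero (sep : List Char) (fuel : Nat) (l cur : List Char) (acc : List (List Char)) :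
    PySem.Chars.splitOnMax.go sep fuel 0 l cur acc = ((cur.reverse ++ l) :: acc).reverse := by
  cases fuel with
  | zero => simp [PySem.Chars.splitOnMax.go]
  | succ f => cases l with
    | nil => simp [PySem.Chars.splitOnMax.go]
    | cons c rest => simp [PySem.Chars.splitOnMax.go]

theorem pv_go_one (sep : List Char) (fuel : Nat) (l cur : List Char) (acc : List (List Char))
    (hf : l.length < fuel) :
    PySem.Chars.splitOnMax.go sep fuel 1 l cur acc =
      (match pvSplitFirst sep l with
       | none => ((cur.reverse ++ l) :: acc).reverse
       | some (pre, post) => (post :: (cur.reverse ++ pre) :: acc).reverse) := by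
  induction fuel generalizing l cur acc with
  | zero => omega
  | succ f ih =>
    cases l with
    | nil => simp [PySem.Chars.splitOnMax.go, pvSplitFirst]
    | cons c rest =>
      by_cases hp : sep.isPrefixOf (c :: rest)
      · simp [PySem.Chars.splitOnMax.go, pvSplitFirst, hp, pv_go_zero]
      · simp only [PySem.Chars.splitOnMax.go, hp]
        rw [ih rest (c :: cur) acc (by simpa using Nat.lt_of_succ_lt_succ hf)]
        cases h : pvSplitFirst sep rest with
        | none => simp [pvSplitFirst, hp, h]
        | some p => cases p with | mk a b => simp [pvSplitFirst, hp, h]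

theorem pvSplitColon_eq (l : List Char) : pvSplitColon l = pvSplitFirst [':', ' '] l := by
  rw [pvSplitColon, PySem.Chars.splitMax?]
  norm_num [PySem.Chars.splitOnMax]
  rw [pv_go_one [':', ' '] (l.length + 1) l [] [] (by omega)]
  cases h : pvSplitFirst [':', ' '] l with
  | none => simp
  | some p => cases p with | mk a b => simp

theorem pvSplitFirst_isSome (sep s : List Char) (hsep : sep ≠ []) (h : sep <:+: s) :
    (pvSplitFirst sep s).isSome := by
  induction s with
  | nil => simp at h; exact absurd h hsep
  | cons c rest ih =>
    rw [List.infix_cons_iff] at h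
    cases h with
    | inl h =>
      rw [pvSplitFirst]
      simp [List.isPrefixOf_iff_prefix.mpr h]
    | inr h =>
      rw [pvSplitFirst]
      by_cases hp : sep.isPrefixOf (c :: rest) <;> simp [hp, ih h]

-- absorbing the second piece into the first commutes with '\n'.join
theorem pv_join_fold (s a b : List Char) (r : List (List Char)) :
    PySem.Chars.join s (a :: b :: r) = PySem.Chars.join s ((a ++ s ++ b) :: r) := by
  cases r with
  | nil => simp [PySem.Chars.join_cons_cons, PySem.Chars.join_singleton]
  | cons c r' =>
    rw [PySem.Chars.join_cons_cons, PySem.Chars.join_cons_cons s b,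
        PySem.Chars.join_cons_cons s (a ++ s ++ b)]
    simp [List.append_assoc]

-- the output map shared by both ports
def pvF (p : List Char × List Char) : String × String := (String.ofList p.1, String.ofList p.2)

-- B's recursion with a pending header: what pvBuild does after splitting the head line
def pvPend (h v : List Char) (L : List (List Char)) : Option (List (String × String)) :=
  match pvBuild (L.dropWhile pvIsCont) with
  | none => none
  | some tl => some ((String.ofList h,
      String.ofList (PySem.Chars.join ['\n']
        (v :: (L.takeWhile pvIsCont).map (fun c => PySem.List.slice c (some 1) none)))) :: tl)

theorem pvBuild_cons (line : List Char) (rest : List (List Char)) (h v : List Char)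
    (hs : pvSplitColon line = some (h, v)) :
    pvBuild (line :: rest) = pvPend h v rest := by
  rw [pvBuild, hs, pvPend]

def pvOutA (st : Option (List (List Char × List Char) × Option (List Char × List Char))) :
    List (String × String) :=
  match st with
  | none => []
  | some (hdrl, protohdr) => (hdrl ++ protohdr.toList).map pvF

-- tab continuations are folded identically on both sides
theorem pvPend_cont (h v : List Char) (l : List Char) (L : List (List Char))
    (hc : pvIsCont l = true) :
    pvPend h v (l :: L) = pvPend h (v ++ '\n' :: PySem.List.slice l (some 1) none) L := by
  rw [pvPend, pvPend, List.dropWhile_cons_of_pos hc, List.takeWhile_cons_of_pos hc]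
  cases pvBuild (L.dropWhile pvIsCont) with
  | none => rfl
  | some tl =>
    simp only [List.map_cons]
    rw [pv_join_fold]
    have : v ++ ['\n'] ++ PySem.List.slice l (some 1) none
         = v ++ '\n' :: PySem.List.slice l (some 1) none := by simp
    rw [this]

-- main simulation: A's fold from a pending (h, v) equals B's pended recursion
theorem pv_main (n : Nat) (L : List (List Char)) (hn : L.length ≤ n)
    (hne : ∀ l ∈ L, l ≠ [])
    (hsp : ∀ l ∈ L, PySem.List.pyGet? l 0 ≠ some '\t' → PySem.Chars.isIn [':', ' '] l = true)
    (hdrl : List (List Char × List Char)) (h v : List Char) :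
    ∃ tl, pvPend h v L = some tl ∧
      pvOutA (L.foldl pvStepA (some (hdrl, some (h, v)))) = hdrl.map pvF ++ tl := by
  induction n generalizing L hdrl h v with
  | zero =>
    have : L = [] := List.length_eq_zero_iff.mp (Nat.le_zero.mp hn)
    subst this
    refine ⟨[pvF (h, v)], ?_, ?_⟩
    · rw [pvPend]
      simp [pvBuild, PySem.Chars.join_singleton, pvF]
    · simp [pvOutA, pvF]
  | succ n ih =>
    cases L with
    | nil =>
      refine ⟨[pvF (h, v)], ?_, ?_⟩
      · rw [pvPend]; simp [pvBuild, PySem.Chars.join_singleton, pvF]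
      · simp [pvOutA, pvF]
    | cons l L' =>
      have hl : l ≠ [] := hne l List.mem_cons_self
      obtain ⟨c0, ltl, rfl⟩ : ∃ c0 ltl, l = c0 :: ltl := by
        cases l with
        | nil => exact absurd rfl hl
        | cons a b => exact ⟨a, b, rfl⟩
      have hget : PySem.List.pyGet? (c0 :: ltl) 0 = some c0 := by
        simp [PySem.List.pyGet?, PySem.List.pyIdx?]
      by_cases htab : c0 = '\t'
      · -- continuation line
        subst htab
        have hc : pvIsCont ('\t' :: ltl) = true := by
          rw [pvIsCont, PySem.Chars.startswith_iff]
          exact ⟨ltl, rfl⟩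
        have hA : pvStepA (some (hdrl, some (h, v))) ('\t' :: ltl) =
            some (hdrl, some (h, v ++ '\n' :: PySem.List.slice ('\t' :: ltl) (some 1) none)) := by
          simp [pvStepA]
        rw [List.foldl_cons, hA, pvPend_cont h v _ L' hc]
        exact ih L' (by simpa using Nat.lt_succ_iff.mp (Nat.lt_of_lt_of_le (by simp) hn))
          (fun x hx => hne x (List.mem_cons_of_mem _ hx))
          (fun x hx => hsp x (List.mem_cons_of_mem _ hx)) hdrl h _
      · -- a fresh header line
        have hnt : PySem.List.pyGet? (c0 :: ltl) 0 ≠ some '\t' := by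
          rw [hget]; intro hh; exact htab (Option.some.inj hh)
        have hin := hsp _ List.mem_cons_self hnt
        obtain ⟨⟨h2, v2⟩, hsplit⟩ : ∃ hv, pvSplitColon (c0 :: ltl) = some hv := by
          have := pvSplitFirst_isSome [':', ' '] (c0 :: ltl) (by simp)
            ((PySem.Chars.isIn_iff_infix _ _).mp hin)
          rw [← pvSplitColon_eq] at this
          exact ⟨(pvSplitColon (c0 :: ltl)).get this, by simp⟩
        have hA : pvStepA (some (hdrl, some (h, v))) (c0 :: ltl) =
            some (hdrl ++ [(h, v)], some (h2, v2)) := by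
          simp [pvStepA, hsplit, htab]
        have hc : pvIsCont (c0 :: ltl) = false := by
          rw [pvIsCont, Bool.eq_false_iff]
          intro hh
          obtain ⟨t, ht⟩ := (PySem.Chars.startswith_iff _ _).mp hh
          exact htab (by injection ht with h1 _; exact h1.symm)
        obtain ⟨tl', hB', hout'⟩ := ih L'
          (by simpa using Nat.lt_succ_iff.mp (Nat.lt_of_lt_of_le (by simp) hn))
          (fun x hx => hne x (List.mem_cons_of_mem _ hx))
          (fun x hx => hsp x (List.mem_cons_of_mem _ hx)) (hdrl ++ [(h, v)]) h2 v2
        refine ⟨pvF (h, v) :: tl', ?_, ?_⟩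
        · rw [pvPend, List.dropWhile_cons_of_neg (by simp [hc]),
              List.takeWhile_cons_of_neg (by simp [hc]),
              pvBuild_cons _ _ _ _ hsplit, hB']
          simp [PySem.Chars.join_singleton, pvF]
        · rw [List.foldl_cons, hA, hout']
          simp [pvF]

theorem pv_skip_empty (lines : List (List Char))
    (st : Option (List (List Char × List Char) × Option (List Char × List Char))) :
    lines.foldl pvStepA st = (lines.filter (fun l => !l.isEmpty)).foldl pvStepA st := by
  induction lines generalizing st with
  | nil => rfl
  | cons l rest ih =>
    by_cases hl : l = []
    · subst hl
      have : pvStepA st [] = st := by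
        cases st with
        | none => rfl
        | some p => cases p with | mk a b => simp [pvStepA]
      simp [List.filter, this, ih]
    · have : (!l.isEmpty) = true := by simp [hl]
      simp only [List.foldl_cons, List.filter_cons, this, if_pos]
      exact ih _

-- ===== VERDICT (by name: the statement is the Claim_ definition above) =====
theorem headersToTuples_spec : Claim_equal_headersToTuples := by
  intro hdrs _ hpre
  unfold Spec_headersToTuples headersToTuples headersToTuples_alt
  rw [pv_skip_empty]
  set F := (PySem.Chars.splitOn hdrs.toList ['\n']).filter (fun l => !l.isEmpty) with hF
  have hne : ∀ l ∈ F, l ≠ [] := by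
    intro l hl
    have := List.of_mem_filter hl
    simpa [List.isEmpty_iff] using this
  have hsp : ∀ l ∈ F, PySem.List.pyGet? l 0 ≠ some '\t' →
      PySem.Chars.isIn [':', ' '] l = true := by
    intro l hl
    exact hpre.1 l (List.mem_of_mem_filter hl) (hne l hl)
  cases hFc : F with
  | nil => simp [pvBuild]
  | cons l R =>
    have hl : l ∈ F := by rw [hFc]; exact List.mem_cons_self
    have hlne := hne l hl
    obtain ⟨c0, ltl, rfl⟩ : ∃ c0 ltl, l = c0 :: ltl := by
      cases l with
      | nil => exact absurd rfl hlne
      | cons a b => exact ⟨a, b, rfl⟩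
    have hhead : (!PySem.Chars.startswith (c0 :: ltl) ['\t']) = true := by
      have h2 := hpre.2
      rw [← hF, hFc] at h2
      simpa using h2
    have htab : c0 ≠ '\t' := by
      intro hh; subst hh
      have hsw : PySem.Chars.startswith ('\t' :: ltl) ['\t'] = true :=
        (PySem.Chars.startswith_iff _ _).mpr ⟨ltl, rfl⟩
      rw [hsw] at hhead
      simp at hhead
    have hget : PySem.List.pyGet? (c0 :: ltl) 0 = some c0 := by
      simp [PySem.List.pyGet?, PySem.List.pyIdx?]
    have hnt : PySem.List.pyGet? (c0 :: ltl) 0 ≠ some '\t' := by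
      rw [hget]; intro hh; exact htab (Option.some.inj hh)
    have hin := hsp _ hl hnt
    obtain ⟨⟨h2, v2⟩, hsplit⟩ : ∃ hv, pvSplitColon (c0 :: ltl) = some hv := by
      have := pvSplitFirst_isSome [':', ' '] (c0 :: ltl) (by simp)
        ((PySem.Chars.isIn_iff_infix _ _).mp hin)
      rw [← pvSplitColon_eq] at this
      exact ⟨(pvSplitColon (c0 :: ltl)).get this, by simp⟩
    have hA : pvStepA (some ([], none)) (c0 :: ltl) = some ([], some (h2, v2)) := by
      simp [pvStepA, hsplit, htab]
    obtain ⟨tl, hB, hout⟩ := pv_main R.length R le_rfl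
      (fun x hx => hne x (hFc ▸ List.mem_cons_of_mem _ hx))
      (fun x hx => hsp x (hFc ▸ List.mem_cons_of_mem _ hx)) [] h2 v2
    rw [List.foldl_cons, hA, pvBuild_cons _ _ _ _ hsplit, hB]
    have := hout
    rw [List.map_nil, List.nil_append] at this
    rw [← this]
    rfl
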